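-- pv_equiv track=rewrite | github.com/STEMMIAJ/Maestro | src/pipeline/gestor-processos.py | determinar_status
-- ===== SOURCE A (Python) =====
-- def determinar_status(checklist):
--     """Determina status baseado no checklist."""
--     if not checklist:
--         return "novo"
--     concluidos = sum(1 for v in checklist.values() if v)
--     total = len(checklist)
--     if concluidos == total:
--         return "concluido"
--     if concluidos > 0:
--         return "em_andamento"
--     return "pendente"
-- ===== SOURCE B (Python) =====
-- def determinar_status(checklist):
--     """Determina status baseado no checklist."""
--     status = "novo"
--     for v in checklist.values():
--         if status == "novo":
--             status = "concluido" if v else "pendente"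
--         elif (status == "concluido") != bool(v):
--             return "em_andamento"
--     return status
-- ===== Notes on version B (the rewrite author's own statement) =====
-- stated objective: alternative
-- what changed: Replaces the full count-and-compare with a single-pass state machine over the values that returns 'em_andamento' early as soon as a true and a false value have both been seen, carrying the tentative status string itself as the loop state (no count, no length, no empty-list guard).
import Mathlib
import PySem

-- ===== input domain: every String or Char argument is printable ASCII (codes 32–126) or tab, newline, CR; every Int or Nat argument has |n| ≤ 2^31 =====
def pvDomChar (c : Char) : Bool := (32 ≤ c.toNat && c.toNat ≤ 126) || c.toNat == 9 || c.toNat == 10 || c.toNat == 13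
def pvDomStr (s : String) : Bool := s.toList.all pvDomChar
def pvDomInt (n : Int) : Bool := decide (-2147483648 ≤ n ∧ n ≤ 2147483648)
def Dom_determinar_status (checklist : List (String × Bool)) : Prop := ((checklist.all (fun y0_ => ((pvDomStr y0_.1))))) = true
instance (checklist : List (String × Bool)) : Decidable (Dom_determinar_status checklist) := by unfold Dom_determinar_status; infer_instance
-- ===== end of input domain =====

-- B replaces A's count-and-compare with a single-pass state machine carrying the tentative
-- status string, returning "em_andamento" early once a true and a false value were both seen.

-- ===== PORT A =====
-- Port of A: count the true values, compare with the length.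
def determinar_status (checklist : List (String × Bool)) : String :=
  if checklist = [] then "novo"
  else
    let concluidos : Int := checklist.foldl (fun acc kv => if kv.2 then acc + 1 else acc) 0
    let total : Int := (checklist.length : Int)
    if concluidos = total then "concluido"
    else if concluidos > 0 then "em_andamento"
    else "pendente"

-- ===== PORT B =====
-- Port of B's loop: state machine over the values with early return on a mixed pair.
def dsAltLoop : List (String × Bool) → String → String
  | [], st => st
  | kv :: t, st =>
    if st = "novo" then dsAltLoop t (if kv.2 then "concluido" else "pendente")
    else if (decide (st = "concluido")) != kv.2 then "em_andamento"
    else dsAltLoop t st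

def determinar_status_alt (checklist : List (String × Bool)) : String :=
  dsAltLoop checklist "novo"

-- ===== PRECONDITION & SPEC =====
def Spec_determinar_status (checklist : List (String × Bool)) (out : String) : Prop := out = determinar_status_alt checklist
instance (checklist : List (String × Bool)) (out : String) : Decidable (Spec_determinar_status checklist out) := by unfold Spec_determinar_status; infer_instance

-- ===== CLAIM (what is proved, stated in full; the proofs are below) =====
def Claim_equal_determinar_status : Prop := ∀ (checklist : List (String × Bool)), Dom_determinar_status checklist → Spec_determinar_status checklist (determinar_status checklist)

-- ===== LEMMAS AND PROOFS =====

-- The fold computes the number of true values (shifted by the accumulator).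
lemma count_fold (l : List (String × Bool)) (a : Int) :
    l.foldl (fun acc kv => if kv.2 then acc + 1 else acc) a
      = a + (l.countP (fun kv => kv.2) : Int) := by
  induction l generalizing a with
  | nil => simp
  | cons h t ih =>
    simp only [List.foldl, List.countP_cons]
    rcases h with ⟨k, b⟩
    cases b <;> simp [ih, add_assoc, add_comm]
lemma loop_concluido (t : List (String × Bool)) :
    dsAltLoop t "concluido" = if t.all (fun kv => kv.2) then "concluido" else "em_andamento" := by
  induction t with
  | nil => simp [dsAltLoop]
  | cons h s ih =>
    rcases h with ⟨k, b⟩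
    cases b <;> simp only [dsAltLoop, List.all_cons, Bool.true_and, Bool.false_and] <;> simp [ih]
lemma loop_pendente (t : List (String × Bool)) :
    dsAltLoop t "pendente" = if t.any (fun kv => kv.2) then "em_andamento" else "pendente" := by
  induction t with
  | nil => simp [dsAltLoop]
  | cons h s ih =>
    rcases h with ⟨k, b⟩
    cases b <;> simp only [dsAltLoop, List.any_cons, Bool.false_or, Bool.true_or] <;> simp [ih]

-- ===== VERDICT (by name: the statement is the Claim_ definition above) =====
theorem determinar_status_spec : Claim_equal_determinar_status := by
  intro checklist _
  unfold Spec_determinar_status determinar_status determinar_status_alt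
  cases checklist with
  | nil => simp [dsAltLoop]
  | cons h t =>
    rcases h with ⟨k, b⟩
    have hle : t.countP (fun kv => kv.2) ≤ t.length := List.countP_le_length
    have hall_iff : (t.all fun kv => kv.2) = true ↔ t.countP (fun kv => kv.2) = t.length := by
      rw [List.all_eq_true, List.countP_eq_length]
    have hany_iff : (t.any fun kv => kv.2) = true ↔ 0 < t.countP (fun kv => kv.2) := by
      rw [List.any_eq_true, List.countP_pos_iff]
    rw [if_neg (List.cons_ne_nil _ _)]
    simp only [count_fold, zero_add, List.countP_cons, List.length_cons]
    cases b with
    | true =>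
      simp only [dsAltLoop, if_true]
      rw [loop_concluido]
      by_cases hall : (t.all fun kv => kv.2) = true
      · have h1 : ((t.countP (fun kv => kv.2) + 1 : ℕ) : Int) = ((t.length + 1 : ℕ) : Int) := by
          have := hall_iff.mp hall; omega
        rw [if_pos h1, if_pos hall]
      · have h1 : ¬ ((t.countP (fun kv => kv.2) + 1 : ℕ) : Int) = ((t.length + 1 : ℕ) : Int) := by
          intro h; exact hall (hall_iff.mpr (by omega))
        rw [if_neg h1, if_neg hall,
          if_pos (show ((t.countP (fun kv => kv.2) + 1 : ℕ) : Int) > 0 by positivity)]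
    | false =>
      simp only [dsAltLoop, reduceIte, Bool.false_eq_true, if_false, Nat.add_zero]
      rw [loop_pendente]
      have h1 : ¬ ((t.countP (fun kv => kv.2) : ℕ) : Int) = ((t.length + 1 : ℕ) : Int) := by
        omega
      rw [if_neg h1]
      by_cases hany : (t.any fun kv => kv.2) = true
      · have h2 : ((t.countP (fun kv => kv.2) : ℕ) : Int) > 0 := by
          have := hany_iff.mp hany; omega
        rw [if_pos h2, if_pos hany]
      · have h2 : ¬ ((t.countP (fun kv => kv.2) : ℕ) : Int) > 0 := by
          intro h; exact hany (hany_iff.mpr (by omega))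
        rw [if_neg h2, if_neg hany]
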